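-- pv_equiv track=rewrite | github.com/nec-research/OpenIE_LFP | lfp_utils.py | tup_match
-- ===== SOURCE A (Python) =====
-- def tup_match(old_name, old_pos, en2tar):
--
--     ''' matching tuples with (name, pos) = (old name, old pos) into new tuples.'''
--
--     start, end = old_pos[0], old_pos[1]
--     src_seq = [j for j in range(start, end+1)]
--     tar_seq = []
--     old_name_splited = old_name.split(' ')
--     while '' in old_name_splited:
--         old_name_splited.remove('')
--     new_name = []
--
--     for i, j in enumerate(src_seq):
--         if j in en2tar:
--             tar_seq.append(en2tar[j])
--             new_name.append((old_name_splited[i], en2tar[j]))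
--
--     new_name = sorted(new_name, key=lambda x: x[1])
--
--     tar_name = ' '.join([n[0].replace('<sep>', ' ') for n in new_name])
--     tar_seq.sort()
--
--     return tar_name, tar_seq
-- ===== SOURCE B (Python) =====
-- def tup_match(old_name, old_pos, en2tar):
--     start, end = old_pos[0], old_pos[1]
--     words = [w for w in old_name.split(' ') if w != '']
--     pairs = sorted(((j, t) for j, t in en2tar.items() if start <= j <= end),
--                    key=lambda p: p[0])
--     pairs = sorted(pairs, key=lambda p: p[1])
--     tar_name = ' '.join(words[j - start].replace('<sep>', ' ') for j, t in pairs)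
--     tar_seq = [t for _, t in pairs]
--     return tar_name, tar_seq
-- ===== Notes on version B (the rewrite author's own statement) =====
-- stated objective: simpler
-- what changed: Instead of scanning every position in range(start, end+1) and testing dict membership, B filters en2tar's items to the window, sorts the (key, target) pairs once by key and once by target, and derives both tar_name and tar_seq from that single sorted pair list; the separate tar_seq accumulation and its extra sort, and the while-remove cleaning loop, disappear. Pre_ additionally excludes association lists with duplicate keys (not representable as a Python dict argument) and inputs where an in-window key indexes past the cleaned word list, on which A raises IndexError.
import Mathlib
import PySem

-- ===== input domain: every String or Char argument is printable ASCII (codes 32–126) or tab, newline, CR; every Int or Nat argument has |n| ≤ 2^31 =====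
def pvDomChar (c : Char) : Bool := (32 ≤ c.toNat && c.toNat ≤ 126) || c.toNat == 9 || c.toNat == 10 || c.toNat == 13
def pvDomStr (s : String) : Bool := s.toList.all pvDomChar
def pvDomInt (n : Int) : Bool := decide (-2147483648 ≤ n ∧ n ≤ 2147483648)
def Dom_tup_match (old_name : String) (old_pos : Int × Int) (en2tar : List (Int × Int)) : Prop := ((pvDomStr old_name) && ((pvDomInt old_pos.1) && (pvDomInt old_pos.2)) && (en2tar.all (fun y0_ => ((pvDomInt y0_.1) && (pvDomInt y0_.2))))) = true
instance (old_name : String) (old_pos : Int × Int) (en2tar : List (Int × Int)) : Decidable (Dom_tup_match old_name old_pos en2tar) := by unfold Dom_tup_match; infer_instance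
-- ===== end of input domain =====

-- B replaces A's scan of every position in range(start, end+1) by a filter of en2tar's items,
-- deriving both outputs from one sorted pair list (objective: simpler; equal on Pre_).

-- ===== PORT A =====
-- while '' in lst: lst.remove('')   (lst.remove('') = lst.erase "" when present, cf. PySem.List.remove?_eq_some_erase)
def pyRemoveAll (l : List String) : List String :=
  if _h : "" ∈ l then pyRemoveAll (l.erase "") else l
termination_by l.length
decreasing_by
  rw [List.length_erase_of_mem _h]
  exact Nat.sub_lt (List.length_pos_of_mem _h) Nat.one_pos

-- the body of A's for-loop over enumerate(src_seq): acc = (tar_seq, new_name)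
def stepA (d : PySem.Dict Int Int) (w : List String) (acc : List Int × List (String × Int))
    (ij : Int × Int) : List Int × List (String × Int) :=
  if d.contains ij.2 then
    (acc.1 ++ [d.getD ij.2 0], acc.2 ++ [(PySem.List.pyGetD w ij.1 "", d.getD ij.2 0)])
  else acc

def tup_match (old_name : String) (old_pos : Int × Int) (en2tar : List (Int × Int)) : String × List Int :=
  let start := old_pos.1
  let stop := old_pos.2
  let src_seq := PySem.List.pyRange start (stop + 1) 1
  let old_name_splited := pyRemoveAll ((PySem.Str.split? old_name " ").getD [])
  let d := PySem.Dict.mk en2tar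
  let res := (PySem.List.enumerate src_seq 0).foldl (stepA d old_name_splited) ([], [])
  let new_name := PySem.List.sorted res.2 (fun x => x.2)
  let tar_name := PySem.Str.join " " (new_name.map (fun n => PySem.Str.replace n.1 "<sep>" " "))
  let tar_seq := PySem.List.sorted res.1 (fun x => x)
  (tar_name, tar_seq)

-- ===== PORT B =====
def tup_match_alt (old_name : String) (old_pos : Int × Int) (en2tar : List (Int × Int)) : String × List Int :=
  let start := old_pos.1
  let stop := old_pos.2
  let words := ((PySem.Str.split? old_name " ").getD []).filter (fun w => w != "")
  let pairs0 := PySem.List.sorted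
      ((PySem.Dict.mk en2tar).items.filter (fun p => decide (start ≤ p.1) && decide (p.1 ≤ stop)))
      (fun p => p.1)
  let pairs := PySem.List.sorted pairs0 (fun p => p.2)
  let tar_name := PySem.Str.join " "
      (pairs.map (fun p => PySem.Str.replace (PySem.List.pyGetD words (p.1 - start) "") "<sep>" " "))
  (tar_name, pairs.map (fun p => p.2))

-- ===== PRECONDITION & SPEC =====
-- Pre_ excludes (a) association lists with duplicate keys, which no Python dict argument can be,
-- and (b) inputs where some key inside [start, end] indexes past the cleaned word list, on which A raises IndexError.
def Pre_tup_match (old_name : String) (old_pos : Int × Int) (en2tar : List (Int × Int)) : Prop :=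
  (en2tar.map Prod.fst).Nodup ∧
  ∀ p ∈ en2tar, old_pos.1 ≤ p.1 → p.1 ≤ old_pos.2 →
    p.1 - old_pos.1 < (((PySem.Str.split? old_name " ").getD []).filter (fun w => w != "")).length
instance (old_name : String) (old_pos : Int × Int) (en2tar : List (Int × Int)) : Decidable (Pre_tup_match old_name old_pos en2tar) := by unfold Pre_tup_match; infer_instance

def pvWitness_tup_match : String × (Int × Int) × (List (Int × Int)) := ("a b", (0, 1), [(0, 5), (1, 3)])

def Spec_tup_match (old_name : String) (old_pos : Int × Int) (en2tar : List (Int × Int)) (out : String × List Int) : Prop := out = tup_match_alt old_name old_pos en2tar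
instance (old_name : String) (old_pos : Int × Int) (en2tar : List (Int × Int)) (out : String × List Int) : Decidable (Spec_tup_match old_name old_pos en2tar out) := by unfold Spec_tup_match; infer_instance

-- ===== CLAIM (what is proved, stated in full; the proofs are below) =====
def Claim_equal_tup_match : Prop := ∀ (old_name : String) (old_pos : Int × Int) (en2tar : List (Int × Int)), Dom_tup_match old_name old_pos en2tar → Pre_tup_match old_name old_pos en2tar → Spec_tup_match old_name old_pos en2tar (tup_match old_name old_pos en2tar)

-- ===== LEMMAS AND PROOFS =====

-- erasing one '' does not change the (≠ '')-filter
theorem filter_erase_empty (l : List String) :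
    (l.erase "").filter (fun w => w != "") = l.filter (fun w => w != "") := by
  induction l with
  | nil => rfl
  | cons a l ih =>
    by_cases ha : a = ""
    · subst ha; simp
    · simp [ha, ih]

theorem pyRemoveAll_eq_filter (l : List String) :
    pyRemoveAll l = l.filter (fun w => w != "") := by
  induction l using pyRemoveAll.induct with
  | case1 l h ih =>
    rw [pyRemoveAll]; simp only [h, dite_true]
    rw [ih, filter_erase_empty]
  | case2 l h =>
    rw [pyRemoveAll]; simp only [h, dite_false]
    exact (List.filter_eq_self.mpr (fun a ha => by
      simp only [bne_iff_ne, ne_eq]; rintro rfl; exact h ha)).symm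

-- sorting a mapped list, when the key factors through the map, is mapping the sorted list
theorem insertBy_map {α β κ : Type} [LinearOrder κ] (g : α → β) (k1 : α → κ) (k2 : β → κ)
    (h : ∀ a, k2 (g a) = k1 a) (x : α) (ys : List α) :
    PySem.List.insertBy (fun a b => decide (k2 a < k2 b)) (g x) (ys.map g) =
      (PySem.List.insertBy (fun a b => decide (k1 a < k1 b)) x ys).map g := by
  induction ys with
  | nil => rfl
  | cons y ys ih =>
    simp only [List.map_cons, PySem.List.insertBy, h]
    split_ifs with hlt
    · simp
    · simp [ih]

theorem sorted_map_comm {α β κ : Type} [LinearOrder κ] (g : α → β) (k1 : α → κ) (k2 : β → κ)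
    (h : ∀ a, k2 (g a) = k1 a) (l : List α) :
    PySem.List.sorted (l.map g) k2 = (PySem.List.sorted l k1).map g := by
  rw [PySem.List.sorted_eq_foldl_insertBy, PySem.List.sorted_eq_foldl_insertBy]
  suffices hgen : ∀ (l : List α) (acc : List α),
      (l.map g).foldl (fun acc x => PySem.List.insertBy (fun a b => decide (k2 a < k2 b)) x acc) (acc.map g) =
      (l.foldl (fun acc x => PySem.List.insertBy (fun a b => decide (k1 a < k1 b)) x acc) acc).map g by
    simpa using hgen l []
  intro l
  induction l with
  | nil => intro acc; rfl
  | cons x l ih =>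
    intro acc
    simp only [List.map_cons, List.foldl_cons]
    rw [insertBy_map g k1 k2 h x acc]
    exact ih _

-- A's for-loop over enumerate(range(start, start+n)) collects, in j order,
-- the values and the (word, value) pairs of the keys present in the dict
theorem loopA (d : PySem.Dict Int Int) (w : List String) (start : Int) (n : Nat) :
    (PySem.List.enumerate (PySem.List.pyRange start (start + (n : Int)) 1) 0).foldl (stepA d w) ([], []) =
      (((PySem.List.pyRange start (start + (n : Int)) 1).filter (fun j => d.contains j)).map (fun j => d.getD j 0),
       ((PySem.List.pyRange start (start + (n : Int)) 1).filter (fun j => d.contains j)).map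
         (fun j => (PySem.List.pyGetD w (j - start) "", d.getD j 0))) := by
  induction n with
  | zero =>
    rw [PySem.List.pyRange_one_eq_nil (by simp)]
    rfl
  | succ n ih =>
    have hcast : start + ((n + 1 : Nat) : Int) = (start + (n : Int)) + 1 := by push_cast; ring
    rw [hcast, PySem.List.pyRange_one_succ_right (by omega),
      PySem.List.enumerate_append, List.foldl_append, ih,
      List.filter_append, List.map_append, List.map_append]
    have hlen : ((PySem.List.pyRange start (start + (n : Int)) 1).length : Int) = (n : Int) := by
      rw [PySem.List.length_pyRange_one]; omega
    simp only [PySem.List.enumerate_cons, PySem.List.enumerate_nil, hlen, List.foldl_cons,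
      List.foldl_nil, stepA, zero_add, List.filter_cons]
    have hidx : start + (n : Int) - start = (n : Int) := by omega
    by_cases hc : d.contains (start + (n : Int))
    · simp [hc, hidx]
    · simp [hc]

-- the filtered items of the dict, sorted by key, are exactly A's j-increasing candidate pairs
theorem pairs0_eq_cand (en2tar : List (Int × Int)) (start stop : Int)
    (hnd : (en2tar.map Prod.fst).Nodup) :
    PySem.List.sorted
      ((PySem.Dict.mk en2tar).items.filter (fun p => decide (start ≤ p.1) && decide (p.1 ≤ stop)))
      (fun p => p.1) =
    ((PySem.List.pyRange start (stop + 1) 1).filter (fun j => (PySem.Dict.mk en2tar).contains j)).map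
      (fun j => (j, (PySem.Dict.mk en2tar).getD j 0)) := by
  set d := PySem.Dict.mk en2tar with hd
  have hkeys : d.keys.Nodup := by rw [hd, PySem.Dict.keys_mk]; exact hnd
  have hitems : d.items = en2tar := rfl
  apply PySem.List.sorted_eq_of_perm_of_pairwise_lt
  · -- permutation, via nodup + same membership
    rw [List.perm_ext_iff_of_nodup]
    · intro p
      simp only [List.mem_map, List.mem_filter, PySem.List.mem_pyRange_one, hitems,
        decide_eq_true_eq, Bool.and_eq_true]
      constructor
      · rintro ⟨j, ⟨⟨hj1, hj2⟩, hc⟩, rfl⟩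
        rw [PySem.Dict.contains_eq_isSome_get?] at hc
        obtain ⟨t, ht⟩ := Option.isSome_iff_exists.mp hc
        have hmem : (j, t) ∈ en2tar := by
          rw [← hitems]; exact (PySem.Dict.get?_eq_some_iff_mem_items d j t hkeys).mp ht
        have hgd : d.getD j 0 = t := by rw [PySem.Dict.getD_eq_get?_getD, ht]; rfl
        rw [hgd]
        exact ⟨hmem, hj1, by omega⟩
      · rintro ⟨hmem, hj1, hj2⟩
        have hget : d.get? p.1 = some p.2 := by
          apply (PySem.Dict.get?_eq_some_iff_mem_items d p.1 p.2 hkeys).mpr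
          rw [hitems]; exact hmem
        refine ⟨p.1, ⟨⟨hj1, by omega⟩, ?_⟩, ?_⟩
        · rw [PySem.Dict.contains_eq_isSome_get?, hget]; rfl
        · rw [PySem.Dict.getD_eq_get?_getD, hget]; rfl
    · -- candidate pairs nodup (first components strictly increase)
      apply List.Nodup.map (fun a b hab => congrArg Prod.fst hab)
      exact ((PySem.List.nodup_pyRange_one start (stop + 1)).filter _)
    · rw [hitems]
      exact (List.Nodup.of_map _ hnd).filter _
  · -- strictly increasing first components
    rw [List.pairwise_map]
    exact ((PySem.List.pairwise_lt_pyRange_one start (stop + 1)).filter _).imp (fun h => h)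

-- ===== VERDICT (by name: the statement is the Claim_ definition above) =====
theorem tup_match_spec : Claim_equal_tup_match := by
  intro old_name old_pos en2tar _ hpre
  obtain ⟨hnd, _⟩ := hpre
  unfold Spec_tup_match tup_match tup_match_alt
  set start := old_pos.1
  set stop := old_pos.2
  set d := PySem.Dict.mk en2tar with hd
  set w : List String := ((PySem.Str.split? old_name " ").getD []).filter (fun w => w != "") with hw
  set cand : List Int := (PySem.List.pyRange start (stop + 1) 1).filter (fun j => d.contains j) with hcand
  set candP : List (Int × Int) := cand.map (fun j => (j, d.getD j 0)) with hcandP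
  -- A's word list is B's
  have hwords : pyRemoveAll ((PySem.Str.split? old_name " ").getD []) = w :=
    pyRemoveAll_eq_filter _
  -- A's loop result
  have hres : (PySem.List.enumerate (PySem.List.pyRange start (stop + 1) 1) 0).foldl (stepA d w) ([], []) =
      (cand.map (fun j => d.getD j 0),
       cand.map (fun j => (PySem.List.pyGetD w (j - start) "", d.getD j 0))) := by
    by_cases hle : start ≤ stop + 1
    · have hn : stop + 1 = start + (((stop + 1 - start).toNat : Nat) : Int) := by omega
      rw [hcand, hn]; exact loopA d w start _
    · rw [hcand, PySem.List.pyRange_one_eq_nil (by omega)]; rfl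
  -- B's first sort equals A's candidate pair list
  have hp0 : PySem.List.sorted
      (d.items.filter (fun p => decide (start ≤ p.1) && decide (p.1 ≤ stop))) (fun p => p.1) = candP :=
    pairs0_eq_cand en2tar start stop hnd
  -- both tar_seq and new_name are projections of the one sorted pair list
  have hseq : PySem.List.sorted (cand.map (fun j => d.getD j 0)) (fun x => x) =
      (PySem.List.sorted candP (fun p => p.2)).map (fun p => p.2) := by
    rw [← sorted_map_comm (fun p : Int × Int => p.2) (fun p => p.2) (fun x => x) (fun _ => rfl) candP,
      hcandP, List.map_map]
    rfl
  have hname : PySem.List.sorted (cand.map (fun j => (PySem.List.pyGetD w (j - start) "", d.getD j 0)))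
      (fun x : String × Int => x.2) =
      (PySem.List.sorted candP (fun p => p.2)).map
        (fun p : Int × Int => (PySem.List.pyGetD w (p.1 - start) "", p.2)) := by
    rw [← sorted_map_comm (fun p : Int × Int => (PySem.List.pyGetD w (p.1 - start) "", p.2))
        (fun p => p.2) (fun x : String × Int => x.2) (fun _ => rfl) candP,
      hcandP, List.map_map]
    rfl
  simp only [hwords, hres, hp0, hseq, hname, List.map_map]
  rfl
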